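-- pv_equiv track=rewrite | github.com/AlessandroRomanelli/USI-Spring-2018 | Algorithms/Week7/find_distance.py | ImpossibleAlgo
-- ===== SOURCE A (Python) =====
-- def ImpossibleAlgo(A):
--     x = i = 0
--     j = 1
--     while j < len(A):
--         if A[j] > A[j-1]:
--             if A[j] - A[i] > x:
--                 x = A[j] - A[i]
--         else:
--             i = j
--         j += 1
--     return x
-- ===== SOURCE B (Python) =====
-- def ImpossibleAlgo(A):
--     # Phase 1: split A into maximal strictly increasing runs, keeping (first, last) of each.
--     runs = []
--     k = 0
--     n = len(A)
--     while k < n: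
--         start = A[k]
--         k += 1
--         while k < n and A[k] > A[k - 1]:
--             k += 1
--         runs.append((start, A[k - 1]))
--     # Phase 2: reduce: the best gain of an increasing run is last - first.
--     best = 0
--     for first, last in runs:
--         best = max(best, last - first)
--     return best
-- ===== Notes on version B (the rewrite author's own statement) =====
-- stated objective: alternative
-- what changed: B splits A into maximal strictly increasing runs in one pass and then reduces over the runs' (first,last) pairs, instead of A's index loop that tracks a reset anchor and running maximum simultaneously.
import Mathlib
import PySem

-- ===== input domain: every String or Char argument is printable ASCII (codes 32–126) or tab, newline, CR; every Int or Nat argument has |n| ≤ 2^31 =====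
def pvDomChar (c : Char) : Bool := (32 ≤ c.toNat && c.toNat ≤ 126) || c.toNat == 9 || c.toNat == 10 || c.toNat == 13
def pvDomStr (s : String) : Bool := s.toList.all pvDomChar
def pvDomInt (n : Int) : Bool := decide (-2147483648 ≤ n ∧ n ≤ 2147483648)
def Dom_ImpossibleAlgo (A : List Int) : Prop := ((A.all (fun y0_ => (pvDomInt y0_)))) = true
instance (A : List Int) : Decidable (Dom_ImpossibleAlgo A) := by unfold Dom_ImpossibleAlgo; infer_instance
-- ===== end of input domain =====

-- B re-structures A's single anchored scan as "split into maximal strictly increasing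
-- runs, then reduce over (first,last) of each run"; alternative decomposition, same cost.

-- ===== PORT A =====
-- A's while loop over index j with reset anchor i and running maximum x.
def pvAloop (A : List Int) (x : Int) (i j : Nat) : Int :=
  if _h : j < A.length then
    if A.getD j 0 > A.getD (j - 1) 0 then
      if A.getD j 0 - A.getD i 0 > x then
        pvAloop A (A.getD j 0 - A.getD i 0) i (j + 1)
      else
        pvAloop A x i (j + 1)
    else
      pvAloop A x j (j + 1)
  else x
termination_by A.length - j

def ImpossibleAlgo (A : List Int) : Int := pvAloop A 0 0 1

-- ===== PORT B =====
-- inner while of phase 1: consume the rest of the strictly increasing run started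
-- before `prev`; return (last element of the run, remaining list).
def pvTakeRun (prev : Int) (xs : List Int) : Int × List Int :=
  match xs with
  | [] => (prev, [])
  | a :: rs => if a > prev then pvTakeRun a rs else (prev, a :: rs)

theorem pvTakeRun_len (prev : Int) (xs : List Int) :
    (pvTakeRun prev xs).2.length ≤ xs.length := by
  induction xs generalizing prev with
  | nil => simp [pvTakeRun]
  | cons a rs ih =>
    simp only [pvTakeRun]
    split
    · exact le_trans (ih a) (Nat.le_succ _)
    · simp

-- phase 1: the list of (first, last) pairs of the maximal strictly increasing runs.
def pvRuns : List Int → List (Int × Int)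
  | [] => []
  | a :: rs =>
    let t := pvTakeRun a rs
    (a, t.1) :: pvRuns t.2
termination_by xs => xs.length
decreasing_by
  simpa using Nat.lt_succ_of_le (pvTakeRun_len a rs)

-- phase 2: reduce.
def ImpossibleAlgo_alt (A : List Int) : Int :=
  (pvRuns A).foldl (fun best p => max best (p.2 - p.1)) 0

-- ===== PRECONDITION & SPEC =====
def Spec_ImpossibleAlgo (A : List Int) (out : Int) : Prop := out = ImpossibleAlgo_alt A
instance (A : List Int) (out : Int) : Decidable (Spec_ImpossibleAlgo A out) := by unfold Spec_ImpossibleAlgo; infer_instance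

-- ===== CLAIM (what is proved, stated in full; the proofs are below) =====
def Claim_equal_ImpossibleAlgo : Prop := ∀ (A : List Int), Dom_ImpossibleAlgo A → Spec_ImpossibleAlgo A (ImpossibleAlgo A)

-- ===== LEMMAS AND PROOFS =====

-- A's loop rephrased on the suffix list, with the max-update folded in:
-- base = A[i], prev = A[j-1], rest = A.drop j.
def pvListLoop (x base prev : Int) : List Int → Int
  | [] => x
  | a :: rs => if a > prev then pvListLoop (max x (a - base)) base a rs
               else pvListLoop x a a rs

theorem pvTakeRun_le (prev : Int) (xs : List Int) : prev ≤ (pvTakeRun prev xs).1 := by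
  induction xs generalizing prev with
  | nil => simp [pvTakeRun]
  | cons a rs ih =>
    simp only [pvTakeRun]
    split
    · exact le_trans (by omega) (ih a)
    · simp

theorem pvFoldMax (R : List (Int × Int)) (c d : Int) :
    R.foldl (fun best p => max best (p.2 - p.1)) (max c d)
      = max c (R.foldl (fun best p => max best (p.2 - p.1)) d) := by
  induction R generalizing d with
  | nil => simp
  | cons p R ih =>
    simp only [List.foldl_cons]
    rw [max_assoc, ih]

theorem pvAltFold_nonneg (xs : List Int) : 0 ≤ ImpossibleAlgo_alt xs := by
  unfold ImpossibleAlgo_alt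
  rw [show (0 : Int) = max 0 0 by simp, pvFoldMax]
  simp

-- runs unfolding on a cons cell
theorem pvAlt_cons (a : Int) (rs : List Int) :
    ImpossibleAlgo_alt (a :: rs)
      = max 0 (max ((pvTakeRun a rs).1 - a) (ImpossibleAlgo_alt (pvTakeRun a rs).2)) := by
  unfold ImpossibleAlgo_alt
  rw [pvRuns]
  simp only [List.foldl_cons]
  have hla := pvTakeRun_le a rs
  rw [pvFoldMax]
  nth_rewrite 1 [show ((pvTakeRun a rs).1 - a) = max ((pvTakeRun a rs).1 - a) 0 by omega]
  rw [pvFoldMax]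

-- main invariant lemma for the list-level loop
theorem pvListLoop_eq (rest : List Int) (x base prev : Int)
    (hx : 0 ≤ x) (hpb : prev - base ≤ x) :
    pvListLoop x base prev rest
      = max x (max ((pvTakeRun prev rest).1 - base)
          (ImpossibleAlgo_alt (pvTakeRun prev rest).2)) := by
  induction rest generalizing x base prev with
  | nil =>
    simp only [pvListLoop, pvTakeRun]
    have := pvAltFold_nonneg ([] : List Int)
    simp [ImpossibleAlgo_alt, pvRuns] at *
    omega
  | cons a rs ih =>
    simp only [pvListLoop, pvTakeRun]
    by_cases h : a > prev
    · simp only [if_pos h]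
      rw [ih (max x (a - base)) base a (by omega) (by omega)]
      have hla := pvTakeRun_le a rs
      have := pvAltFold_nonneg (pvTakeRun a rs).2
      omega
    · simp only [if_neg h]
      rw [ih x a a hx (by omega)]
      rw [pvAlt_cons]
      have hla := pvTakeRun_le a rs
      have := pvAltFold_nonneg (pvTakeRun a rs).2
      omega

-- bridge: A's index loop equals the list-level loop on the suffix
theorem pvBridge (A : List Int) (x : Int) (i j : Nat)
    (hj : 1 ≤ j) (hij : i < j) :
    pvAloop A x i j = pvListLoop x (A.getD i 0) (A.getD (j - 1) 0) (A.drop j) := by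
  by_cases h : j < A.length
  · have hdrop : A.drop j = A.getD j 0 :: A.drop (j + 1) := by
      rw [List.getD_eq_getElem A 0 h]
      exact List.drop_eq_getElem_cons h
    rw [pvAloop, dif_pos h, hdrop]
    simp only [pvListLoop]
    by_cases hcmp : A.getD j 0 > A.getD (j - 1) 0
    · simp only [if_pos hcmp]
      rw [pvBridge A _ i (j + 1) (by omega) (by omega),
          pvBridge A x i (j + 1) (by omega) (by omega)]
      simp only [Nat.add_sub_cancel]
      by_cases hup : A.getD j 0 - A.getD i 0 > x
      · rw [if_pos hup, max_eq_right (by omega)]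
      · rw [if_neg hup, max_eq_left (by omega)]
    · simp only [if_neg hcmp]
      rw [pvBridge A x j (j + 1) (by omega) (by omega)]
      simp only [Nat.add_sub_cancel]
  · rw [pvAloop, dif_neg h]
    rw [List.drop_eq_nil_of_le (by omega)]
    simp [pvListLoop]
termination_by A.length - j
decreasing_by all_goals omega

-- ===== VERDICT (by name: the statement is the Claim_ definition above) =====
theorem ImpossibleAlgo_spec : Claim_equal_ImpossibleAlgo := by
  intro A _
  unfold Spec_ImpossibleAlgo ImpossibleAlgo
  cases A with
  | nil => simp [pvAloop, ImpossibleAlgo_alt, pvRuns]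
  | cons a rs =>
    rw [pvBridge (a :: rs) 0 0 1 (by omega) (by omega)]
    simp only [List.getD_cons_zero, Nat.sub_self, List.drop_one, List.tail_cons]
    rw [pvListLoop_eq rs 0 a a le_rfl (by omega)]
    rw [pvAlt_cons]
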